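-- pv_equiv track=rewrite | github.com/newaetech/chipwhisperer-minimal | chipwhisperer/common/utils/util.py | binarylist2bytearray
-- ===== SOURCE A (Python) =====
-- def binarylist2bytearray(bitlist, nrBits=8):
--     ret = []
--     pos = 0
--     while pos <= len(bitlist) - nrBits:
--         out = 0
--         for bit in range(nrBits):
--             out = (out << 1) | bitlist[pos + bit]
--         ret.append(out)
--         pos += nrBits
--     return ret
-- ===== SOURCE B (Python) =====
-- def binarylist2bytearray(bitlist, nrBits=8):
--     limit = (len(bitlist) // nrBits) * nrBits
--     ret = []
--     out = 0
--     cnt = 0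
--     for bit in bitlist[:limit]:
--         out = (out << 1) | bit
--         cnt += 1
--         if cnt == nrBits:
--             ret.append(out)
--             out = 0
--             cnt = 0
--     return ret
-- ===== Notes on version B (the rewrite author's own statement) =====
-- stated objective: simpler
-- what changed: Replaces the nested position/bit loops with repeated indexing by one streaming pass over the valid prefix bitlist[:limit], maintaining a shift-or accumulator and a bit counter that emits a value every nrBits bits; Pre_ requires nrBits >= 1 because A never returns (loops forever) for nrBits <= 0.
import Mathlib
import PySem

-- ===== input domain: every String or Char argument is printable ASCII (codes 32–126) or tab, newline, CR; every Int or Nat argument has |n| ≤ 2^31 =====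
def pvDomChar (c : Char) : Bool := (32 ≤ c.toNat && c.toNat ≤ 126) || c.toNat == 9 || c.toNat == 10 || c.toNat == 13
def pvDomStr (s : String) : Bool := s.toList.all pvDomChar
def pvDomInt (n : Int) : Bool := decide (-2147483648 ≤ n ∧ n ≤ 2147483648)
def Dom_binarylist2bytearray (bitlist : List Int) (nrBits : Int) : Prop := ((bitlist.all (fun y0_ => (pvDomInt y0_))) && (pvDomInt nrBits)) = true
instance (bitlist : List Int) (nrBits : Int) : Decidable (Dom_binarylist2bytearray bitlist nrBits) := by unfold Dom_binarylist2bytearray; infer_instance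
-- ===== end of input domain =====

-- B replaces A's nested position/bit loops by one streaming pass over the valid
-- prefix with a shift-or accumulator and a bit counter (objective: simpler).

-- ===== PORT A =====
-- inner loop: 'for bit in range(nrBits): out = (out << 1) | bitlist[pos + bit]'
-- (indexing via pyGetD: under Pre_ the while condition keeps every index in range)
def binAinner (bitlist : List Int) (pos nrBits : Int) : Int :=
  (PySem.List.pyRange 0 nrBits 1).foldl
    (fun out bit => Int.lor (out <<< (1 : Int)) (PySem.List.pyGetD bitlist (pos + bit) 0)) 0

-- the 'while pos <= len(bitlist) - nrBits' loop; the fuel only makes it total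
-- (under Pre_, nrBits ≥ 1, fewer than bitlist.length + 1 iterations happen)
def binAloop (bitlist : List Int) (nrBits : Int) : Nat → Int → List Int → List Int
  | 0, _, ret => ret
  | fuel+1, pos, ret =>
    if pos ≤ PySem.List.len bitlist - nrBits then
      binAloop bitlist nrBits fuel (pos + nrBits) (ret ++ [binAinner bitlist pos nrBits])
    else ret

def binarylist2bytearray (bitlist : List Int) (nrBits : Int) : List Int :=
  binAloop bitlist nrBits (bitlist.length + 1) 0 []

-- ===== PORT B =====
-- one step of B's streaming loop over the state (ret, out, cnt)
def binBstep (nrBits : Int) (st : List Int × Int × Int) (bit : Int) : List Int × Int × Int :=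
  let out := Int.lor (st.2.1 <<< (1 : Int)) bit
  let cnt := st.2.2 + 1
  if cnt = nrBits then (st.1 ++ [out], 0, 0) else (st.1, out, cnt)

def binarylist2bytearray_alt (bitlist : List Int) (nrBits : Int) : List Int :=
  let limit := (PySem.Int.floordiv (PySem.List.len bitlist) nrBits) * nrBits
  ((PySem.List.slice bitlist none (some limit)).foldl (binBstep nrBits) ([], 0, 0)).1

-- ===== PRECONDITION & SPEC =====
-- Pre_ excludes nrBits ≤ 0: there A never returns (its while loop runs forever,
-- since pos += nrBits no longer approaches the bound).
def Pre_binarylist2bytearray (bitlist : List Int) (nrBits : Int) : Prop := 1 ≤ nrBits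
instance (bitlist : List Int) (nrBits : Int) : Decidable (Pre_binarylist2bytearray bitlist nrBits) := by unfold Pre_binarylist2bytearray; infer_instance

def pvWitness_binarylist2bytearray : List Int × Int := ([1, 0, 1, 1, 0, 1], 2)

def Spec_binarylist2bytearray (bitlist : List Int) (nrBits : Int) (out : List Int) : Prop := out = binarylist2bytearray_alt bitlist nrBits
instance (bitlist : List Int) (nrBits : Int) (out : List Int) : Decidable (Spec_binarylist2bytearray bitlist nrBits out) := by unfold Spec_binarylist2bytearray; infer_instance

-- ===== CLAIM (what is proved, stated in full; the proofs are below) =====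
def Claim_equal_binarylist2bytearray : Prop := ∀ (bitlist : List Int) (nrBits : Int), Dom_binarylist2bytearray bitlist nrBits → Pre_binarylist2bytearray bitlist nrBits → Spec_binarylist2bytearray bitlist nrBits (binarylist2bytearray bitlist nrBits)

-- ===== LEMMAS AND PROOFS =====

-- reference value: the packed n-bit groups, as many full groups as fit
def pvChunks (n : Nat) (bl : List Int) : List Int :=
  if 0 < n ∧ n ≤ bl.length then
    (bl.take n).foldl (fun o b => Int.lor (o <<< (1 : Int)) b) 0 :: pvChunks n (bl.drop n)
  else []
termination_by bl.length
decreasing_by simp; omega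

-- A's inner index loop is a fold over the slice it reads
lemma lemA_range (bl : List Int) (pos : Nat) (init : Int) :
    ∀ (n : Nat), pos + n ≤ bl.length →
    (PySem.List.pyRange 0 (n : Int) 1).foldl
      (fun out bit => Int.lor (out <<< (1 : Int)) (PySem.List.pyGetD bl ((pos : Int) + bit) 0)) init
    = ((bl.drop pos).take n).foldl (fun o b => Int.lor (o <<< (1 : Int)) b) init := by
  intro n
  induction n with
  | zero => intro _; simp [PySem.List.pyRange_one_eq_nil]
  | succ n ih =>
    intro hle
    have h1 : ((n + 1 : Nat) : Int) = (n : Int) + 1 := by push_cast; ring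
    rw [h1, PySem.List.pyRange_one_succ_right (by positivity), List.foldl_append,
        ih (by omega)]
    have hidx : pos + n < bl.length := by omega
    have hd : (bl.drop pos).take (n + 1)
        = (bl.drop pos).take n ++ [bl[pos + n]] := by
      rw [List.take_add_one]
      have : (bl.drop pos)[n]? = some bl[pos + n] := by
        rw [List.getElem?_drop]
        exact List.getElem?_eq_getElem (by omega)
      simp [this]
    rw [hd, List.foldl_append]
    have : PySem.List.pyGetD bl ((pos : Int) + (n : Int)) 0 = bl[pos + n] := by
      have hc : (pos : Int) + (n : Int) = ((pos + n : Nat) : Int) := by push_cast; ring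
      rw [hc, PySem.List.pyGetD_natCast, List.getD_eq_getElem _ _ hidx]
    simp [this]

-- A's while loop emits exactly the packed groups of the unread suffix
lemma lemA_loop (bl : List Int) (n : Nat) (hn : 1 ≤ n) :
    ∀ (fuel : Nat) (pos : Nat) (ret : List Int), bl.length - pos < fuel →
    binAloop bl (n : Int) fuel (pos : Int) ret = ret ++ pvChunks n (bl.drop pos) := by
  intro fuel
  induction fuel with
  | zero => intro pos ret h; omega
  | succ fuel ih =>
    intro pos ret h
    rw [binAloop]
    by_cases hc : pos + n ≤ bl.length
    · have hcond : (pos : Int) ≤ PySem.List.len bl - (n : Int) := by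
        simp [PySem.List.len]; omega
      rw [if_pos hcond]
      have hcast : (pos : Int) + (n : Int) = ((pos + n : Nat) : Int) := by push_cast; ring
      rw [hcast, ih (pos + n) _ (by omega)]
      have hlen : n ≤ (bl.drop pos).length := by simp; omega
      have hinner : binAinner bl (pos : Int) (n : Int)
          = ((bl.drop pos).take n).foldl (fun o b => Int.lor (o <<< (1 : Int)) b) 0 := by
        unfold binAinner
        exact lemA_range bl pos 0 n hc
      have hrhs : pvChunks n (bl.drop pos)
          = ((bl.drop pos).take n).foldl (fun o b => Int.lor (o <<< (1 : Int)) b) 0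
            :: pvChunks n (bl.drop (pos + n)) := by
        rw [pvChunks, if_pos ⟨hn, hlen⟩, List.drop_drop, Nat.add_comm]
      rw [hrhs, hinner]
      simp
    · have hcond : ¬ ((pos : Int) ≤ PySem.List.len bl - (n : Int)) := by
        simp [PySem.List.len]; omega
      rw [if_neg hcond, pvChunks]
      have : ¬ (0 < n ∧ n ≤ (bl.drop pos).length) := by
        simp; omega
      rw [if_neg this, List.append_nil]

-- B's step function, run over one whole group, emits its packed value
lemma lemB_group (n : Nat) :
    ∀ (g : List Int) (c : Nat) (out : Int) (ret : List Int),
    c + g.length = n → c < n →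
    g.foldl (binBstep (n : Int)) (ret, out, (c : Int))
      = (ret ++ [g.foldl (fun o b => Int.lor (o <<< (1 : Int)) b) out], 0, 0) := by
  intro g
  induction g with
  | nil => intro c out ret hlen hlt; simp at hlen; omega
  | cons b g' ih =>
    intro c out ret hlen hlt
    rw [List.foldl_cons]
    have hstep : binBstep (n : Int) (ret, out, (c : Int)) b
        = if ((c : Int) + 1 = (n : Int)) then (ret ++ [Int.lor (out <<< (1 : Int)) b], 0, 0)
          else (ret, Int.lor (out <<< (1 : Int)) b, (c : Int) + 1) := rfl
    rw [hstep]
    by_cases hend : c + 1 = n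
    · have hg' : g' = [] := by
        have : g'.length = 0 := by simp at hlen; omega
        exact List.length_eq_zero_iff.mp this
      have hi : ((c : Int) + 1 = (n : Int)) := by omega
      rw [if_pos hi]
      subst hg'
      simp
    · have hi : ¬ ((c : Int) + 1 = (n : Int)) := by omega
      rw [if_neg hi]
      have hcast : (c : Int) + 1 = ((c + 1 : Nat) : Int) := by push_cast; ring
      rw [hcast, ih (c + 1) _ ret (by simp at hlen ⊢; omega) (by omega)]
      simp

-- B's whole fold over a list of group-aligned length
lemma lemB_all (n : Nat) (hn : 0 < n) :
    ∀ (k : Nat) (xs : List Int), xs.length ≤ k → n ∣ xs.length → ∀ (ret : List Int),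
    xs.foldl (binBstep (n : Int)) (ret, 0, 0) = (ret ++ pvChunks n xs, 0, 0) := by
  intro k
  induction k with
  | zero =>
    intro xs hk _ ret
    have : xs = [] := List.length_eq_zero_iff.mp (by omega)
    subst this
    rw [pvChunks, if_neg (by simp; omega)]
    simp
  | succ k ih =>
    intro xs hk hdvd ret
    by_cases hnil : xs = []
    · subst hnil
      rw [pvChunks, if_neg (by simp; omega)]
      simp
    · have hlen : n ≤ xs.length := by
        rcases hdvd with ⟨m, hm⟩
        cases m with
        | zero => exact absurd (List.length_eq_zero_iff.mp (by simpa using hm)) hnil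
        | succ m => rw [hm, Nat.mul_succ]; omega
      have hsplit : xs = xs.take n ++ xs.drop n := (List.take_append_drop n xs).symm
      conv_lhs => rw [hsplit]
      rw [List.foldl_append]
      have hzero : ((0 : Nat) : Int) = (0 : Int) := by norm_num
      have hgrp := lemB_group n (xs.take n) 0 0 ret (by simp; omega) hn
      rw [hzero] at hgrp
      rw [hgrp]
      have hdvd' : n ∣ (xs.drop n).length := by
        rcases hdvd with ⟨m, hm⟩
        cases m with
        | zero => exact absurd (List.length_eq_zero_iff.mp (by simpa using hm)) hnil
        | succ m => exact ⟨m, by simp [hm, Nat.mul_succ]⟩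
      rw [ih (xs.drop n) (by simp; omega) hdvd']
      have hrhs : pvChunks n xs
          = (xs.take n).foldl (fun o b => Int.lor (o <<< (1 : Int)) b) 0 :: pvChunks n (xs.drop n) := by
        rw [pvChunks, if_pos ⟨hn, hlen⟩]
      rw [hrhs]
      simp

-- packing the aligned prefix packs the whole list: the tail below n bits never contributes
lemma lemC (n : Nat) (hn : 0 < n) :
    ∀ (k : Nat) (bl : List Int), bl.length ≤ k →
    pvChunks n (bl.take (bl.length / n * n)) = pvChunks n bl := by
  intro k
  induction k with
  | zero =>
    intro bl hk
    have : bl = [] := List.length_eq_zero_iff.mp (by omega)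
    subst this; simp
  | succ k ih =>
    intro bl hk
    by_cases hle : n ≤ bl.length
    · have hq : bl.length / n = (bl.length - n) / n + 1 := Nat.div_eq_sub_div hn hle
      set q := (bl.length - n) / n with hqdef
      have hm : bl.length / n * n = q * n + n := by rw [hq]; ring
      have hmle : bl.length / n * n ≤ bl.length := Nat.div_mul_le_self _ _
      have hc1 : n ≤ (bl.take (bl.length / n * n)).length := by
        rw [List.length_take]
        exact Nat.le_min.mpr ⟨by rw [hm]; exact Nat.le_add_left _ _, hle⟩
      have hlhs : pvChunks n (bl.take (bl.length / n * n))
          = ((bl.take (bl.length / n * n)).take n).foldl (fun o b => Int.lor (o <<< (1 : Int)) b) 0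
            :: pvChunks n ((bl.take (bl.length / n * n)).drop n) := by
        rw [pvChunks, if_pos ⟨hn, hc1⟩]
      have hrhs : pvChunks n bl
          = (bl.take n).foldl (fun o b => Int.lor (o <<< (1 : Int)) b) 0
            :: pvChunks n (bl.drop n) := by
        rw [pvChunks, if_pos ⟨hn, hle⟩]
      rw [hlhs, hrhs]
      congr 1
      · congr 1
        rw [List.take_take, Nat.min_eq_left (by rw [hm]; exact Nat.le_add_left _ _)]
      · rw [List.drop_take]
        have h1 : bl.length / n * n - n = (bl.drop n).length / n * n := by
          rw [hm, List.length_drop, ← hqdef]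
          simp
        rw [h1]
        exact ih (bl.drop n) (by simp; omega)
    · have h0 : bl.length / n = 0 := Nat.div_eq_of_lt (by omega)
      rw [h0]
      simp only [Nat.zero_mul, List.take_zero]
      rw [pvChunks, if_neg (by simp; omega), pvChunks, if_neg (by simp; omega)]

-- ===== VERDICT (by name: the statement is the Claim_ definition above) =====
theorem binarylist2bytearray_spec : Claim_equal_binarylist2bytearray := by
  intro bl nrBits _hdom hpre
  unfold Pre_binarylist2bytearray at hpre
  unfold Spec_binarylist2bytearray
  set n := nrBits.toNat with hndef
  have hnb : nrBits = (n : Int) := by rw [hndef]; omega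
  have hn : 1 ≤ n := by omega
  have hA : binarylist2bytearray bl nrBits = pvChunks n bl := by
    rw [hnb]
    unfold binarylist2bytearray
    have h0 : ((0 : Nat) : Int) = (0 : Int) := by norm_num
    have := lemA_loop bl n hn (bl.length + 1) 0 [] (by omega)
    rw [h0] at this
    simpa using this
  have hB : binarylist2bytearray_alt bl nrBits = pvChunks n bl := by
    rw [hnb]
    unfold binarylist2bytearray_alt
    have hfd : (PySem.Int.floordiv (PySem.List.len bl) (n : Int)) * (n : Int)
        = ((bl.length / n * n : Nat) : Int) := by
      simp [PySem.List.len, PySem.Int.floordiv, Int.fdiv_eq_ediv]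
    rw [hfd]
    simp only [PySem.List.slice_to_natCast]
    have hlen : (bl.take (bl.length / n * n)).length = bl.length / n * n := by
      rw [List.length_take]
      exact Nat.min_eq_left (Nat.div_mul_le_self _ _)
    have hdvd : n ∣ (bl.take (bl.length / n * n)).length := by
      rw [hlen]
      exact Dvd.dvd.mul_left (dvd_refl n) _
    have := lemB_all n (by omega) (bl.take (bl.length / n * n)).length
      (bl.take (bl.length / n * n)) le_rfl hdvd []
    rw [this]
    simpa using lemC n (by omega) bl.length bl le_rfl
  rw [hA, hB]
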